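-- pv_equiv track=rewrite | github.com/Pr0t0ns/Discord-Token-Generator | Generator/gen.py | parse_auth_proxy
-- ===== SOURCE A (Python) =====
-- def parse_auth_proxy(proxy):
--     proxy = proxy.replace("@", ":")
--     colons_hit = 0
--     IP_username = ""
--     IP_password = ""
--     IP_Address = ""
--     IP_port = ""
--     for character in proxy:
--         if character == ":":
--             colons_hit = colons_hit + 1
--         else:
--             if colons_hit == 0:
--                 IP_username += character
--             elif colons_hit == 1:
--                 IP_password += character
--             elif colons_hit == 2:
--                 IP_Address += character
--             elif colons_hit == 3:
--                 IP_port += character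
--
--     return IP_username, IP_password, IP_Address, IP_port
-- ===== SOURCE B (Python) =====
-- def parse_auth_proxy(proxy):
--     parts = proxy.replace("@", ":").split(":")
--     parts += [""] * (4 - len(parts))
--     return parts[0], parts[1], parts[2], parts[3]
-- ===== Notes on version B (the rewrite author's own statement) =====
-- stated objective: simpler
-- what changed: Replaces the per-character colon-counting state machine over four string accumulators with a single replace+split call (padding with empty strings, taking the first four fields); the C-level split gives a constant-factor speedup.
import Mathlib
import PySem

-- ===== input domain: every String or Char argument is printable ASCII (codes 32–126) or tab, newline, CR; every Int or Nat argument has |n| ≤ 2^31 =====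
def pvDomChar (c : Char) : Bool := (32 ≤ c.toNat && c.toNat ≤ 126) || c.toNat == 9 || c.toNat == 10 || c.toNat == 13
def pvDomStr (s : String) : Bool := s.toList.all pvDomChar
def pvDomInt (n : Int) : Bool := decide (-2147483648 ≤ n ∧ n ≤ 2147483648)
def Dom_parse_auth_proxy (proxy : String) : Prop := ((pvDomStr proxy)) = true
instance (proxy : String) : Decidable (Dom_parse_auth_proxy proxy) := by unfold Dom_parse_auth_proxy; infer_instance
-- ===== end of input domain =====

-- B replaces A's per-character colon-counting state machine with one replace+split pass,
-- padded with empty strings and indexed for the four fields (simpler; same cost).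

-- ===== PORT A =====
-- A's loop state: (colons_hit, IP_username, IP_password, IP_Address, IP_port), chars as List Char
def paStep (st : Nat × List Char × List Char × List Char × List Char) (c : Char) :
    Nat × List Char × List Char × List Char × List Char :=
  let (k, u, p, a, t) := st
  if c = ':' then (k + 1, u, p, a, t)
  else if k = 0 then (k, u ++ [c], p, a, t)
  else if k = 1 then (k, u, p ++ [c], a, t)
  else if k = 2 then (k, u, p, a ++ [c], t)
  else if k = 3 then (k, u, p, a, t ++ [c])
  else (k, u, p, a, t)

def parse_auth_proxy (proxy : String) : String × String × String × String :=
  let l := (PySem.Str.replace proxy "@" ":").toList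
  let st := l.foldl paStep (0, [], [], [], [])
  (String.ofList st.2.1, String.ofList st.2.2.1, String.ofList st.2.2.2.1, String.ofList st.2.2.2.2)

-- ===== PORT B =====
-- parts = proxy.replace("@", ":").split(":"); parts += [""] * (4 - len(parts)); return first four
def parse_auth_proxy_alt (proxy : String) : String × String × String × String :=
  let parts := List.splitOn ':' (PySem.Str.replace proxy "@" ":").toList
  let parts := parts ++ List.replicate (4 - parts.length) []
  (String.ofList (parts.getD 0 []), String.ofList (parts.getD 1 []),
   String.ofList (parts.getD 2 []), String.ofList (parts.getD 3 []))

-- ===== PRECONDITION & SPEC =====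
def Spec_parse_auth_proxy (proxy : String) (out : String × String × String × String) : Prop := out = parse_auth_proxy_alt proxy
instance (proxy : String) (out : String × String × String × String) : Decidable (Spec_parse_auth_proxy proxy out) := by unfold Spec_parse_auth_proxy; infer_instance

-- ===== CLAIM (what is proved, stated in full; the proofs are below) =====
def Claim_equal_parse_auth_proxy : Prop := ∀ (proxy : String), Dom_parse_auth_proxy proxy → Spec_parse_auth_proxy proxy (parse_auth_proxy proxy)

-- ===== LEMMAS AND PROOFS =====

theorem splitOn_ne_nil (l : List Char) : List.splitOn ':' l ≠ [] := by
  induction l with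
  | nil => simp [List.splitOn]
  | cons c rest ih =>
    by_cases h : c = ':' <;> simp [List.splitOn, h] at * <;>
      cases hs : List.splitOn ':' rest <;> simp_all [List.splitOn]

theorem splitOn_cons (c : Char) (l : List Char) :
    List.splitOn ':' (c :: l) =
      if c = ':' then [] :: List.splitOn ':' l
      else (List.splitOn ':' l).modifyHead (c :: ·) := by
  simp [List.splitOn]

-- the j-th field of A's final state, for a fold started at colon count k with accumulator s
theorem foldA_getD (l : List Char) : ∀ (k : Nat) (u p a t : List Char),
    l.foldl paStep (k, u, p, a, t) =
      (k + (List.splitOn ':' l).length - 1,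
       u ++ (if k ≤ 0 then (List.splitOn ':' l).getD (0 - k) [] else []),
       p ++ (if k ≤ 1 then (List.splitOn ':' l).getD (1 - k) [] else []),
       a ++ (if k ≤ 2 then (List.splitOn ':' l).getD (2 - k) [] else []),
       t ++ (if k ≤ 3 then (List.splitOn ':' l).getD (3 - k) [] else [])) := by
  induction l with
  | nil =>
    intro k u p a t
    simp [List.splitOn]
  | cons c rest ih =>
    intro k u p a t
    rw [List.foldl_cons, splitOn_cons]
    by_cases hc : c = ':'
    · simp only [hc, reduceIte, paStep]
      rw [ih]
      have hlen : (([] : List Char) :: List.splitOn ':' rest).length = (List.splitOn ':' rest).length + 1 := by simp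
      refine Prod.ext ?_ (Prod.ext ?_ (Prod.ext ?_ (Prod.ext ?_ ?_))) <;> simp only
      · have := splitOn_ne_nil rest
        simp [hlen]
      all_goals {
        rcases Nat.lt_or_ge k 4 with hk | hk
        · interval_cases k <;> simp
        · rw [if_neg (by omega), if_neg (by omega)] }
    · simp only [if_neg hc, paStep]
      obtain ⟨h0, P, hP⟩ : ∃ h0 P, List.splitOn ':' rest = h0 :: P := by
        cases hs : List.splitOn ':' rest with
        | nil => exact absurd hs (splitOn_ne_nil rest)
        | cons h0 P => exact ⟨h0, P, rfl⟩
      rcases Nat.lt_or_ge k 4 with hk | hk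
      · interval_cases k <;>
        · simp only [reduceIte]
          rw [ih]
          simp [hP]
      · rw [if_neg (by omega), if_neg (by omega), if_neg (by omega), if_neg (by omega)]
        rw [ih]
        have e : ∀ j : Nat, j ≤ 3 → (¬ k ≤ j) := by omega
        simp only [if_neg (e 0 (by omega)), if_neg (e 1 (by omega)),
          if_neg (e 2 (by omega)), if_neg (e 3 (by omega)), hP]
        simp

theorem padded_getD (parts : List (List Char)) (j : Nat) (_hj : j ≤ 3) :
    (parts ++ List.replicate (4 - parts.length) []).getD j [] = parts.getD j [] := by
  rcases Nat.lt_or_ge j parts.length with h | h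
  · simp [List.getD_eq_getElem?_getD, List.getElem?_append_left h]
  · have h1 : parts[j]? = none := List.getElem?_eq_none h
    have h2 := List.getElem?_append_right (l₁ := parts)
      (l₂ := List.replicate (4 - parts.length) ([] : List Char)) h
    simp only [List.getD_eq_getElem?_getD, h1, h2, List.getElem?_replicate]
    split_ifs <;> simp

-- ===== VERDICT (by name: the statement is the Claim_ definition above) =====
theorem parse_auth_proxy_spec : Claim_equal_parse_auth_proxy := by
  intro proxy _
  unfold Spec_parse_auth_proxy parse_auth_proxy parse_auth_proxy_alt
  simp only
  rw [foldA_getD]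
  simp only [Nat.le_refl, Nat.zero_le, if_pos, Nat.sub_zero, List.nil_append]
  rw [padded_getD _ 0 (by omega), padded_getD _ 1 (by omega),
    padded_getD _ 2 (by omega), padded_getD _ 3 (by omega)]
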